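-- pv_equiv track=rewrite | github.com/SoSorryTT/Alpha-Innovations-Lab | world_list.py | solve
-- ===== SOURCE A (Python) =====
-- def solve(wordList, target):
--     word_dict = {}
--     for i in range(len(wordList)):
--         if wordList[i] in word_dict:
--              return (wordList[i], wordList[i])
--         word_dict[wordList[i]] = i
--
--     for i in range(1, len(target)):
--         prefix = target[:i]
--         suffix = target[i:]
--
--         if prefix in word_dict and suffix in word_dict and word_dict[prefix] != word_dict[suffix]:
--                 return (wordList[word_dict[prefix]], wordList[word_dict[suffix]])
--
--     return None
-- ===== SOURCE B (Python) =====
-- def solve(wordList, target):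
--     first = {}
--     for pos, w in enumerate(wordList):
--         if w in first:
--             return (w, w)
--         first[w] = pos
--     m = len(target)
--     cands = [w for w, i in first.items()
--              if 0 < len(w) < m and target.startswith(w)
--              and first.get(target[len(w):], i) != i]
--     if not cands:
--         return None
--     w = min(cands, key=len)
--     return (w, target[len(w):])
-- ===== Notes on version B (the rewrite author's own statement) =====
-- stated objective: alternative
-- what changed: A tries every split position of target and looks both halves up in the dict; B instead scans the dict's words once, keeps those that are proper prefixes of target whose remainder is also a listed word at another index, and returns the shortest such prefix with its remainder.
import Mathlib
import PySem

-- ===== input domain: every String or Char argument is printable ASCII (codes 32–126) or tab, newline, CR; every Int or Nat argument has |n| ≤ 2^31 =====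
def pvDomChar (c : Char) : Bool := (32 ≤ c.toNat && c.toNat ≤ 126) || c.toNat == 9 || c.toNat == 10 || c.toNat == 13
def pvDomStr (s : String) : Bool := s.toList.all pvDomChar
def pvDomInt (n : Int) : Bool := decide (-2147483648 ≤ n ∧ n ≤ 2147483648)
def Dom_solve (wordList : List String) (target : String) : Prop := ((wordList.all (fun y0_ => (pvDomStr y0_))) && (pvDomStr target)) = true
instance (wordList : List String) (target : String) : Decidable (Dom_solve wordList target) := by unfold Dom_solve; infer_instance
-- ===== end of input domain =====

-- B replaces A's scan over every split of `target` by a scan over the dictionary's words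
-- (prefix candidates filtered, then min by length); alternative algorithm, same results.

-- ===== PORT A =====
-- first loop of A: word -> first index, early return (w, w) on a duplicate
def solveScanA (ws : List String) (i : Int) (d : PySem.Dict String Int) :
    Sum (String × String) (PySem.Dict String Int) :=
  match ws with
  | [] => .inr d
  | w :: rest =>
    if d.contains w then .inl (w, w)
    else solveScanA rest (i + 1) (d.insert w i)

-- second loop of A: for i in range(1, len(target)), first split whose two halves are
-- listed words at distinct indices
def solveSplitA (wordList : List String) (d : PySem.Dict String Int) (target : String) :
    List Int → Option (String × String)
  | [] => none
  | i :: rest =>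
    match d.get? (PySem.Str.slice target none (some i)),
          d.get? (PySem.Str.slice target (some i) none) with
    | some p, some q =>
        if p ≠ q then
          some (PySem.List.pyGetD wordList p "", PySem.List.pyGetD wordList q "")
        else solveSplitA wordList d target rest
    | some _, none => solveSplitA wordList d target rest
    | none, _ => solveSplitA wordList d target rest

def solve (wordList : List String) (target : String) : Option (String × String) :=
  match solveScanA wordList 0 PySem.Dict.empty with
  | .inl p => some p
  | .inr d => solveSplitA wordList d target (PySem.List.pyRange 1 (PySem.Str.len target) 1)

-- ===== PORT B =====
-- B's first loop: `for pos, w in enumerate(wordList)`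
def solveScanB (ps : List (Int × String)) (d : PySem.Dict String Int) :
    Sum (String × String) (PySem.Dict String Int) :=
  match ps with
  | [] => .inr d
  | (pos, w) :: rest =>
    if d.contains w then .inl (w, w)
    else solveScanB rest (d.insert w pos)

def solve_alt (wordList : List String) (target : String) : Option (String × String) :=
  match solveScanB (PySem.List.enumerate wordList 0) PySem.Dict.empty with
  | .inl p => some p
  | .inr first =>
    let m := PySem.Str.len target
    let cands := (first.items.filter (fun p =>
        decide (0 < PySem.Str.len p.1) && decide (PySem.Str.len p.1 < m) &&
        PySem.Str.startswith target p.1 &&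
        decide (first.getD (PySem.Str.slice target (some (PySem.Str.len p.1)) none) p.2 ≠ p.2))).map (·.1)
    match PySem.List.min? cands PySem.Str.len with
    | none => none
    | some w => some (w, PySem.Str.slice target (some (PySem.Str.len w)) none)

-- ===== PRECONDITION & SPEC =====
def Spec_solve (wordList : List String) (target : String) (out : Option (String × String)) : Prop := out = solve_alt wordList target
instance (wordList : List String) (target : String) (out : Option (String × String)) : Decidable (Spec_solve wordList target out) := by unfold Spec_solve; infer_instance

-- ===== CLAIM (what is proved, stated in full; the proofs are below) =====
def Claim_equal_solve : Prop := ∀ (wordList : List String) (target : String), Dom_solve wordList target → Spec_solve wordList target (solve wordList target)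

-- ===== LEMMAS AND PROOFS =====

-- d is a faithful index of wl: unique keys, and each stored index looks up its key in wl
def GoodDict (wl : List String) (d : PySem.Dict String Int) : Prop :=
  d.keys.Nodup ∧ ∀ p ∈ d.items, PySem.List.pyGetD wl p.2 "" = p.1

-- A's split test at cut i, as a Boolean
def condA (d : PySem.Dict String Int) (target : String) (i : Int) : Bool :=
  match d.get? (PySem.Str.slice target none (some i)),
        d.get? (PySem.Str.slice target (some i) none) with
  | some p, some q => p ≠ q
  | _, _ => false

lemma scanB_eq_scanA (ws : List String) : ∀ (i : Int) (d : PySem.Dict String Int),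
    solveScanB (PySem.List.enumerate ws i) d = solveScanA ws i d := by
  induction ws with
  | nil => intro i d; rfl
  | cons w rest ih =>
    intro i d
    rw [PySem.List.enumerate_cons]
    simp only [solveScanB, solveScanA]
    split
    · rfl
    · exact ih (i + 1) (d.insert w i)

-- the dictionary built by A's first loop is a faithful index of wordList
lemma scanA_good (ws : List String) : ∀ (front : List String) (d d' : PySem.Dict String Int),
    GoodDict (front ++ ws) d →
    solveScanA ws (front.length : Int) d = .inr d' →
    GoodDict (front ++ ws) d' := by
  induction ws with
  | nil =>
    intro front d d' hG h
    simp only [solveScanA] at h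
    cases h; exact hG
  | cons w rest ih =>
    intro front d d' hG h
    simp only [solveScanA] at h
    split at h
    · cases h
    · have hfr : front ++ w :: rest = (front ++ [w]) ++ rest := by simp
      have hlen : (front.length : Int) + 1 = ((front ++ [w]).length : Int) := by
        simp [List.length_append]
      rw [hlen] at h
      have hG' : GoodDict ((front ++ [w]) ++ rest) (d.insert w (front.length : Int)) := by
        constructor
        · exact PySem.Dict.nodup_keys_insert d w _ hG.1
        · intro p hp
          rw [PySem.Dict.mem_items_insert] at hp
          rcases hp with rfl | ⟨hp, _⟩
          · simp only
            rw [PySem.List.pyGetD_natCast]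
            simp
          · rw [← hfr]; exact hG.2 p hp
      have := ih (front ++ [w]) _ d' hG' h
      rw [hfr]; exact this

-- under GoodDict, A's split loop is a find? over the cut list
lemma splitA_eq_find (wl : List String) (d : PySem.Dict String Int) (target : String)
    (hG : GoodDict wl d) : ∀ (l : List Int),
    solveSplitA wl d target l =
      (l.find? (condA d target)).map
        (fun i => (PySem.Str.slice target none (some i), PySem.Str.slice target (some i) none)) := by
  intro l
  induction l with
  | nil => rfl
  | cons i rest ih =>
    simp only [solveSplitA, List.find?_cons]
    rcases hp : d.get? (PySem.Str.slice target none (some i)) with _ | p <;>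
      rcases hq : d.get? (PySem.Str.slice target (some i) none) with _ | q <;>
      simp only [condA, hp, hq] <;> try exact ih
    by_cases hpq : p = q
    · subst hpq; simpa using ih
    · have h1 := hG.2 _ (PySem.Dict.mem_items_of_get?_eq_some d hp)
      have h2 := hG.2 _ (PySem.Dict.mem_items_of_get?_eq_some d hq)
      simp only at h1 h2
      simp [hpq, h1, h2]

lemma take_len_slice (target w : String) :
    (PySem.Str.slice target none (some (PySem.Str.len w))).toList = target.toList.take w.toList.length := by
  rw [PySem.Str.toList_slice, PySem.Chars.slice_eq_listSlice, PySem.Str.len_eq,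
    PySem.List.slice_to_natCast]

lemma len_slice_to (target : String) (i : Int) (h0 : 0 ≤ i) (hm : i ≤ PySem.Str.len target) :
    PySem.Str.len (PySem.Str.slice target none (some i)) = i := by
  rw [PySem.Str.len_eq, PySem.Str.toList_slice, PySem.Chars.slice_eq_listSlice,
    PySem.List.slice_to _ h0]
  rw [PySem.Str.len_eq] at hm
  simp only [List.length_take]
  omega

-- membership in B's candidate list, characterised by A's split test at cut len w
lemma mem_cands_iff (wl : List String) (d : PySem.Dict String Int) (target : String)
    (hG : GoodDict wl d) (w : String) :
    w ∈ (d.items.filter (fun p =>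
        decide (0 < PySem.Str.len p.1) && decide (PySem.Str.len p.1 < PySem.Str.len target) &&
        PySem.Str.startswith target p.1 &&
        decide (d.getD (PySem.Str.slice target (some (PySem.Str.len p.1)) none) p.2 ≠ p.2))).map (·.1) ↔
      (1 ≤ PySem.Str.len w ∧ PySem.Str.len w < PySem.Str.len target ∧
       condA d target (PySem.Str.len w) = true ∧
       w = PySem.Str.slice target none (some (PySem.Str.len w))) := by
  constructor
  · intro hw
    simp only [List.mem_map, List.mem_filter] at hw
    obtain ⟨⟨k, v⟩, ⟨hmem, hcond⟩, hk1⟩ := hw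
    simp only at hk1; subst hk1
    simp only [Bool.and_eq_true, decide_eq_true_eq] at hcond
    obtain ⟨⟨⟨h0, hm⟩, hsw⟩, hne⟩ := hcond
    have hget : d.get? k = some v := PySem.Dict.get?_of_mem_items d hmem hG.1
    have hpre : k.toList <+: target.toList := by
      rw [PySem.Str.startswith_eq] at hsw
      exact (PySem.Chars.startswith_iff _ _).mp hsw
    have hk : k = PySem.Str.slice target none (some (PySem.Str.len k)) := by
      rw [← String.toList_inj, take_len_slice]
      exact List.prefix_iff_eq_take.mp hpre
    refine ⟨by omega, hm, ?_, hk⟩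
    unfold condA
    rw [← hk, hget]
    rcases hq : d.get? (PySem.Str.slice target (some (PySem.Str.len k)) none) with _ | q
    · exact absurd (PySem.Dict.getD_of_get?_eq_none d v hq) hne
    · have := PySem.Dict.getD_of_get?_eq_some d (k := _) v hq
      simp only [this] at hne
      simp [Ne.symm hne]
  · rintro ⟨h1, hm, hcond, hw⟩
    unfold condA at hcond
    rw [← hw] at hcond
    rcases hp : d.get? w with _ | p <;> rw [hp] at hcond
    · simp at hcond
    rcases hq : d.get? (PySem.Str.slice target (some (PySem.Str.len w)) none) with _ | q <;>
      rw [hq] at hcond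
    · simp at hcond
    simp only [decide_eq_true_eq] at hcond
    simp only [List.mem_map, List.mem_filter]
    refine ⟨(w, p), ⟨PySem.Dict.mem_items_of_get?_eq_some d hp, ?_⟩, rfl⟩
    simp only [Bool.and_eq_true, decide_eq_true_eq]
    refine ⟨⟨⟨by omega, hm⟩, ?_⟩, ?_⟩
    · rw [PySem.Str.startswith_eq]
      rw [PySem.Chars.startswith_iff]
      rw [List.prefix_iff_eq_take, ← take_len_slice target w, ← hw]
    · rw [PySem.Dict.getD_of_get?_eq_some d p hq]
      exact Ne.symm hcond

-- the first hit of A's split scan is B's shortest candidate word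
lemma main_eq (wl : List String) (d : PySem.Dict String Int) (target : String)
    (hG : GoodDict wl d) :
    solveSplitA wl d target (PySem.List.pyRange 1 (PySem.Str.len target) 1) =
      (match PySem.List.min?
          ((d.items.filter (fun p =>
            decide (0 < PySem.Str.len p.1) && decide (PySem.Str.len p.1 < PySem.Str.len target) &&
            PySem.Str.startswith target p.1 &&
            decide (d.getD (PySem.Str.slice target (some (PySem.Str.len p.1)) none) p.2 ≠ p.2))).map (·.1))
          PySem.Str.len with
      | none => none
      | some w => some (w, PySem.Str.slice target (some (PySem.Str.len w)) none)) := by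
  set m := PySem.Str.len target with hm
  set cands := (d.items.filter (fun p =>
      decide (0 < PySem.Str.len p.1) && decide (PySem.Str.len p.1 < m) &&
      PySem.Str.startswith target p.1 &&
      decide (d.getD (PySem.Str.slice target (some (PySem.Str.len p.1)) none) p.2 ≠ p.2))).map (·.1)
    with hcands
  rw [splitA_eq_find wl d target hG]
  cases hf : (PySem.List.pyRange 1 m 1).find? (condA d target) with
  | none =>
    have hnil : cands = [] := by
      rw [List.eq_nil_iff_forall_not_mem]
      intro w hw
      rw [mem_cands_iff wl d target hG w] at hw
      obtain ⟨h1, h2, h3, _⟩ := hw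
      exact absurd h3 (by
        simpa using List.find?_eq_none.mp hf (PySem.Str.len w)
          (PySem.List.mem_pyRange_one.mpr ⟨h1, h2⟩))
    rw [hnil]
    rfl
  | some i₀ =>
    obtain ⟨hcond₀, as, bs, hsplit, hprior⟩ := List.find?_eq_some_iff_append.mp hf
    have hmem₀ : i₀ ∈ PySem.List.pyRange 1 m 1 := List.mem_of_find?_eq_some hf
    obtain ⟨h1₀, h2₀⟩ := PySem.List.mem_pyRange_one.mp hmem₀
    have hminimal : ∀ j, 1 ≤ j → j < m → condA d target j = true → i₀ ≤ j := by
      intro j hj1 hj2 hjc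
      have hjmem : j ∈ PySem.List.pyRange 1 m 1 := PySem.List.mem_pyRange_one.mpr ⟨hj1, hj2⟩
      rw [hsplit] at hjmem
      rcases List.mem_append.mp hjmem with hja | hjb
      · exact absurd hjc (by simpa using hprior j hja)
      · rcases List.mem_cons.mp hjb with rfl | hjb
        · omega
        · have hpw := PySem.List.pairwise_lt_pyRange_one 1 m
          rw [hsplit] at hpw
          have := hpw.sublist (List.sublist_append_right as (i₀ :: bs))
          exact le_of_lt (List.rel_of_pairwise_cons this hjb)
    have hlen₀ : PySem.Str.len (PySem.Str.slice target none (some i₀)) = i₀ :=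
      len_slice_to target i₀ (by omega) (by omega)
    have hw₀ : PySem.Str.slice target none (some i₀) ∈ cands := by
      rw [hcands, mem_cands_iff wl d target hG]
      rw [hlen₀]
      exact ⟨h1₀, h2₀, hcond₀, rfl⟩
    cases hmin : PySem.List.min? cands PySem.Str.len with
    | none =>
      rw [PySem.List.min?_eq_none_iff] at hmin
      rw [hmin] at hw₀
      cases hw₀
    | some wm =>
      have hwm : wm ∈ cands := PySem.List.min?_mem hmin
      have hwmc := (mem_cands_iff wl d target hG wm).mp (hcands ▸ hwm)
      obtain ⟨hw1, hw2, hw3, hw4⟩ := hwmc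
      have hle1 : i₀ ≤ PySem.Str.len wm := hminimal _ hw1 hw2 hw3
      have hle2 : PySem.Str.len wm ≤ i₀ := by
        have := PySem.List.min?_isMin hmin _ hw₀
        omega
      have hlen : PySem.Str.len wm = i₀ := le_antisymm hle2 hle1
      have hwm_eq : wm = PySem.Str.slice target none (some i₀) := by rw [hw4, hlen]
      simp only [Option.map_some]
      rw [hwm_eq, hlen₀]

-- ===== VERDICT (by name: the statement is the Claim_ definition above) =====
theorem solve_spec : Claim_equal_solve := by
  intro wl target _
  unfold Spec_solve solve solve_alt
  rw [scanB_eq_scanA wl 0 PySem.Dict.empty]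
  cases hscan : solveScanA wl 0 PySem.Dict.empty with
  | inl p => rfl
  | inr d =>
    have hG : GoodDict wl d := by
      have := scanA_good wl [] PySem.Dict.empty d (by
        constructor
        · exact PySem.Dict.nodup_keys_empty
        · intro p hp; simp [PySem.Dict.empty] at hp)
      simp only [List.nil_append, List.length_nil, Int.natCast_zero] at this
      exact this hscan
    simpa using main_eq wl d target hG
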